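-- pv_equiv track=rewrite | github.com/daydream2002/shichuanrl | mah_tool/suphx_extract_features/feature_extract.py | get_four_three_two_card_jing_nums
-- ===== SOURCE A (Python) =====
-- import copy
--
-- def get_four_three_two_card_jing_nums(tile_list, jing_card=0):
--     _tile_list = copy.deepcopy(tile_list)
--     jing_count = _tile_list.count(jing_card)
--
--     for i in range(jing_count):
--         _tile_list.remove(jing_card)
--
--
--     si_card_num = 0
--     san_card_num = 0
--     er_card_num = 0
--     L = list(set(_tile_list))
--     L.sort(key=_tile_list.index)
--
--     for i in L:
--         _count = _tile_list.count(i)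
--         if _count == 4:
--             si_card_num += 1
--         if _count == 3:
--             san_card_num += 1
--         if _count == 2:
--             er_card_num += 1
--
--     return _tile_list,si_card_num, san_card_num, er_card_num, jing_count
-- ===== SOURCE B (Python) =====
-- import copy
--
-- def get_four_three_two_card_jing_nums(tile_list, jing_card=0):
--     _tile_list = copy.deepcopy(tile_list)
--     jing_count = _tile_list.count(jing_card)
--     filtered = [t for t in _tile_list if t != jing_card]
--
--     si_card_num = 0
--     san_card_num = 0
--     er_card_num = 0
--     s = sorted(filtered)
--     n = len(s)
--     i = 0
--     while i < n:
--         j = i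
--         while j < n and s[j] == s[i]:
--             j += 1
--         run = j - i
--         if run == 4:
--             si_card_num += 1
--         elif run == 3:
--             san_card_num += 1
--         elif run == 2:
--             er_card_num += 1
--         i = j
--
--     return filtered, si_card_num, san_card_num, er_card_num, jing_count
-- ===== Notes on version B (the rewrite author's own statement) =====
-- stated objective: alternative
-- what changed: B builds the filtered list with one comprehension instead of count-then-repeated-remove, and gets the 4/3/2 frequency counts by sorting the filtered tiles and scanning the runs of equal values once, instead of A's set-plus-index-sort followed by a full count() scan per distinct tile.
import Mathlib
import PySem

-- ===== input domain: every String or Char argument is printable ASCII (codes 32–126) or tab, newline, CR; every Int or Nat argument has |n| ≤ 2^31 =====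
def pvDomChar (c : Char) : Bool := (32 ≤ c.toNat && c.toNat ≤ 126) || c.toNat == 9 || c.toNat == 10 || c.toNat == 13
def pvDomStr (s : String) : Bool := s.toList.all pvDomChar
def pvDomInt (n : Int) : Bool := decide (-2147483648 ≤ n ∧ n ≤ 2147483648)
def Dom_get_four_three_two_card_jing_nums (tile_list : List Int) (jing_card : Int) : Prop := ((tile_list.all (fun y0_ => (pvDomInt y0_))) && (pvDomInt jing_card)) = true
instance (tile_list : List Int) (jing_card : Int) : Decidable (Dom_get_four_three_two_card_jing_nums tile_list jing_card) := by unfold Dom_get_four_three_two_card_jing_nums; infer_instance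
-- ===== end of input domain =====

-- B replaces A's count-then-repeated-remove by a single filter, and A's set-plus-per-element count()
-- scan by a sort of the filtered tiles followed by one run-length scan (objective: alternative algorithm).

-- ===== PORT A =====
def get_four_three_two_card_jing_nums (tile_list : List Int) (jing_card : Int) : List Int × Int × Int × Int × Int :=
  -- _tile_list = copy.deepcopy(tile_list)  (ints: the copy is the same list of values)
  let _tile_list0 := tile_list
  let jing_count : Int := (PySem.List.count _tile_list0 jing_card : Int)
  -- for i in range(jing_count): _tile_list.remove(jing_card)  (remove always finds jing_card here;
  -- .getD acc is the unreachable ValueError branch)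
  let _tile_list := (PySem.List.pyRange 0 jing_count 1).foldl
      (fun acc _ => (PySem.List.remove? acc jing_card).getD acc) _tile_list0
  -- L = list(set(_tile_list)); L.sort(key=_tile_list.index)  (key injective on the set, so the
  -- hash iteration order of set() cannot influence the sorted result)
  let L := PySem.List.sorted (PySem.Set.ofList _tile_list)
      (fun x => (PySem.List.index? _tile_list x).getD 0) false
  let st := L.foldl (fun st i =>
      let _count := PySem.List.count _tile_list i
      let st := if _count == 4 then (st.1 + 1, st.2.1, st.2.2) else st
      let st := if _count == 3 then (st.1, st.2.1 + 1, st.2.2) else st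
      let st := if _count == 2 then (st.1, st.2.1, st.2.2 + 1) else st
      st) ((0 : Int), (0 : Int), (0 : Int))
  (_tile_list, st.1, st.2.1, st.2.2, jing_count)

-- ===== PORT B =====
-- the outer while loop of Source B: each step consumes one run s[i..j) of equal values
-- (the inner 'while j < n and s[j] == s[i]' is the takeWhile, 'i = j' the dropWhile)
def pvRunScan : List Int → Int × Int × Int
  | [] => (0, 0, 0)
  | x :: rest =>
    let run : Nat := 1 + (rest.takeWhile (fun y => y == x)).length
    let r := pvRunScan (rest.dropWhile (fun y => y == x))
    if run == 4 then (r.1 + 1, r.2.1, r.2.2)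
    else if run == 3 then (r.1, r.2.1 + 1, r.2.2)
    else if run == 2 then (r.1, r.2.1, r.2.2 + 1)
    else r
termination_by l => l.length
decreasing_by
  have := List.length_dropWhile_le (fun y => y == x) rest
  simp only [List.length_cons]; omega

def get_four_three_two_card_jing_nums_alt (tile_list : List Int) (jing_card : Int) : List Int × Int × Int × Int × Int :=
  let _tile_list := tile_list   -- copy.deepcopy
  let jing_count : Int := (PySem.List.count _tile_list jing_card : Int)
  let filtered := _tile_list.filter (fun t => t != jing_card)
  let s := PySem.List.sorted filtered (fun x => x) false
  let st := pvRunScan s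
  (filtered, st.1, st.2.1, st.2.2, jing_count)

-- ===== PRECONDITION & SPEC =====
def Spec_get_four_three_two_card_jing_nums (tile_list : List Int) (jing_card : Int) (out : List Int × Int × Int × Int × Int) : Prop := out = get_four_three_two_card_jing_nums_alt tile_list jing_card
instance (tile_list : List Int) (jing_card : Int) (out : List Int × Int × Int × Int × Int) : Decidable (Spec_get_four_three_two_card_jing_nums tile_list jing_card out) := by unfold Spec_get_four_three_two_card_jing_nums; infer_instance

-- ===== CLAIM (what is proved, stated in full; the proofs are below) =====
def Claim_equal_get_four_three_two_card_jing_nums : Prop := ∀ (tile_list : List Int) (jing_card : Int), Dom_get_four_three_two_card_jing_nums tile_list jing_card → Spec_get_four_three_two_card_jing_nums tile_list jing_card (get_four_three_two_card_jing_nums tile_list jing_card)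

-- ===== LEMMAS AND PROOFS =====

-- A's remove loop, iterated count-many times, is B's filter.
lemma pvRemove_cons_self (x : Int) (xs : List Int) : PySem.List.remove? (x :: xs) x = some xs := by
  simp [PySem.List.remove?]; exact ⟨0, by simp [List.idxOf?_cons], rfl⟩

lemma pvRemove_cons_ne (x v : Int) (xs : List Int) (h : x ≠ v) :
    PySem.List.remove? (x :: xs) v = (PySem.List.remove? xs v).map (x :: ·) := by
  simp [PySem.List.remove?, List.idxOf?_cons, beq_iff_eq, h]
  cases List.idxOf? v xs <;> simp

lemma pvFoldl_ignore_iterate (g : List Int → List Int) (r : List Int) (init : List Int) :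
    r.foldl (fun acc _ => g acc) init = g^[r.length] init := by
  induction r generalizing init with
  | nil => rfl
  | cons a t ih => simp [List.foldl_cons, ih, Function.iterate_succ_apply]

lemma pvLength_pyRange (n : Nat) : (PySem.List.pyRange 0 (n : Int) 1).length = n := by
  induction n with
  | zero => rfl
  | succ k ih =>
    rw [show ((k+1 : Nat) : Int) = (k : Int) + 1 by push_cast; ring,
        PySem.List.pyRange_one_succ_right (by positivity)]
    simp [ih]

lemma pvIterate_remove_ne (c : Int) (x : Int) (xs : List Int) (hx : x ≠ c) (n : Nat) :
    (fun acc => (PySem.List.remove? acc c).getD acc)^[n] (x :: xs)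
      = x :: (fun acc => (PySem.List.remove? acc c).getD acc)^[n] xs := by
  induction n generalizing xs with
  | zero => rfl
  | succ k ih =>
    rw [Function.iterate_succ_apply, Function.iterate_succ_apply]
    have : (PySem.List.remove? (x :: xs) c).getD (x :: xs)
        = x :: (PySem.List.remove? xs c).getD xs := by
      rw [pvRemove_cons_ne x c xs hx]
      cases PySem.List.remove? xs c <;> simp
    rw [this, ih]

lemma pvIterate_remove_count (c : Int) (l : List Int) :
    (fun acc => (PySem.List.remove? acc c).getD acc)^[l.count c] l
      = l.filter (fun t => t != c) := by
  induction l with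
  | nil => simp
  | cons x xs ih =>
    by_cases hx : x = c
    · subst hx
      rw [List.count_cons_self, Function.iterate_succ_apply]
      have : (PySem.List.remove? (x :: xs) x).getD (x :: xs) = xs := by
        rw [pvRemove_cons_self]; rfl
      rw [this, ih]
      simp
    · rw [List.count_cons_of_ne hx, pvIterate_remove_ne c x xs hx, ih]
      simp [hx]

lemma pvRemoveLoop_eq_filter (l : List Int) (c : Int) :
    (PySem.List.pyRange 0 ((l.count c : Nat) : Int) 1).foldl
        (fun acc _ => (PySem.List.remove? acc c).getD acc) l
      = l.filter (fun t => t != c) := by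
  rw [pvFoldl_ignore_iterate, pvLength_pyRange, pvIterate_remove_count]

-- A's counting fold over a list of candidate values is a triple of countP's.
lemma pvFoldA_countP (t : List Int) (L : List Int) (st : Int × Int × Int) :
    L.foldl (fun st i =>
      let _count := List.count i t
      let st := if _count == 4 then (st.1 + 1, st.2.1, st.2.2) else st
      let st := if _count == 3 then (st.1, st.2.1 + 1, st.2.2) else st
      let st := if _count == 2 then (st.1, st.2.1, st.2.2 + 1) else st
      st) st
    = (st.1 + (L.countP (fun v => List.count v t == 4) : Int),
       st.2.1 + (L.countP (fun v => List.count v t == 3) : Int),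
       st.2.2 + (L.countP (fun v => List.count v t == 2) : Int)) := by
  induction L generalizing st with
  | nil => simp
  | cons a l ih =>
    rw [List.foldl_cons, ih]
    simp only [List.countP_cons]
    obtain ⟨s1, s2, s3⟩ := st
    split_ifs <;> simp_all <;> ring_nf

-- the run-length scan on a sorted list counts the distinct values of each frequency
lemma pvRunScan_spec_aux : ∀ (n : Nat) (s : List Int), s.length ≤ n → s.Pairwise (· ≤ ·) →
    pvRunScan s
      = (((PySem.List.dedup s).countP (fun v => s.count v == 4) : Int),
         ((PySem.List.dedup s).countP (fun v => s.count v == 3) : Int),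
         ((PySem.List.dedup s).countP (fun v => s.count v == 2) : Int)) := by
  intro n
  induction n with
  | zero =>
    intro s hs _
    have : s = [] := List.eq_nil_of_length_eq_zero (Nat.le_zero.1 hs)
    subst this; simp [pvRunScan, PySem.List.dedup]
  | succ m ihm =>
    intro s hs h
    cases s with
    | nil => simp [pvRunScan, PySem.List.dedup]
    | cons x rest =>
    set tw := rest.takeWhile (fun y => y == x) with htw
    set d := rest.dropWhile (fun y => y == x) with hd
    have hsplit : tw ++ d = rest := List.takeWhile_append_dropWhile
    have htw_all : ∀ y ∈ tw, y = x := by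
      intro y hy
      have := List.mem_takeWhile_imp hy
      simpa using this
    have hxrest : ∀ y ∈ rest, x ≤ y := fun y hy => List.rel_of_pairwise_cons h hy
    have hrest : rest.Pairwise (· ≤ ·) := h.of_cons
    have hdsorted : d.Pairwise (· ≤ ·) := hrest.sublist (List.dropWhile_sublist _)
    have hdlen : d.length ≤ m := by
      have h1 : d.length ≤ rest.length := hd ▸ List.length_dropWhile_le (fun y => y == x) rest
      have h2 : (x :: rest).length ≤ m + 1 := hs
      simp only [List.length_cons] at h2
      omega
    have hxd : x ∉ d := by
      intro hx
      cases hcd : d with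
      | nil => rw [hcd] at hx; simp at hx
      | cons hdh hdt =>
        have hph : (fun y => y == x) hdh = false := by
          have := List.head?_dropWhile_not (fun y => y == x) rest
          rw [← hd, hcd] at this; simpa using this
        have hne : hdh ≠ x := by simpa using hph
        have hmem : hdh ∈ rest := (List.dropWhile_sublist _).subset (by rw [← hd, hcd]; simp)
        have hlt : x < hdh := lt_of_le_of_ne (hxrest _ hmem) (Ne.symm hne)
        rw [hcd] at hx
        rcases List.mem_cons.1 hx with h1 | h1
        · exact absurd h1.symm hne
        · have : hdh ≤ x := List.rel_of_pairwise_cons (hcd ▸ hdsorted) h1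
          omega
    have hcount_x : (x :: rest).count x = 1 + tw.length := by
      rw [List.count_cons_self, ← hsplit, List.count_append]
      have h1 : tw.count x = tw.length := by
        rw [List.count_eq_length]; intro y hy; simp [htw_all y hy]
      have h2 : d.count x = 0 := List.count_eq_zero.2 hxd
      omega
    have hcount_ne : ∀ v, v ≠ x → (x :: rest).count v = d.count v := by
      intro v hv
      have h0 : tw.count v = 0 := List.count_eq_zero.2 (fun hm' => hv (htw_all v hm'))
      rw [List.count_cons, ← hsplit, List.count_append, h0]
      simp [Ne.symm hv]
    have hperm : (PySem.List.dedup (x :: rest)).Perm (x :: PySem.List.dedup d) := by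
      rw [List.perm_ext_iff_of_nodup (PySem.List.nodup_dedup _)
        (by simp [List.nodup_cons, hxd])]
      intro v
      simp only [PySem.List.mem_dedup, List.mem_cons]
      constructor
      · rintro (rfl | hm)
        · exact Or.inl rfl
        · rw [← hsplit] at hm
          rcases List.mem_append.1 hm with h1 | h1
          · exact Or.inl (htw_all v h1)
          · exact Or.inr h1
      · rintro (rfl | hm)
        · exact Or.inl rfl
        · exact Or.inr (by rw [← hsplit]; exact List.mem_append.2 (Or.inr hm))
    have hcountP : ∀ (k : Nat),
        (PySem.List.dedup (x :: rest)).countP (fun v => (x :: rest).count v == k)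
          = (if (1 + tw.length) == k then 1 else 0)
            + (PySem.List.dedup d).countP (fun v => d.count v == k) := by
      intro k
      rw [hperm.countP_eq, List.countP_cons, hcount_x]
      have : (PySem.List.dedup d).countP (fun v => (x :: rest).count v == k)
          = (PySem.List.dedup d).countP (fun v => d.count v == k) := by
        apply List.countP_congr
        intro v hv
        have hvne : v ≠ x := fun hvv => hxd (hvv ▸ (PySem.List.mem_dedup _ _).1 hv)
        rw [hcount_ne v hvne]
      rw [this]; omega
    rw [pvRunScan, ihm d hdlen hdsorted]
    simp only [← htw, hcountP 4, hcountP 3, hcountP 2]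
    by_cases h4 : 1 + tw.length = 4 <;> by_cases h3 : 1 + tw.length = 3 <;>
      by_cases h2 : 1 + tw.length = 2 <;>
      simp [h4, h3, h2] <;> omega

lemma pvRunScan_spec (s : List Int) (h : s.Pairwise (· ≤ ·)) :
    pvRunScan s
      = (((PySem.List.dedup s).countP (fun v => s.count v == 4) : Int),
         ((PySem.List.dedup s).countP (fun v => s.count v == 3) : Int),
         ((PySem.List.dedup s).countP (fun v => s.count v == 2) : Int)) :=
  pvRunScan_spec_aux s.length s le_rfl h

-- the distinct-values-of-frequency-k count is invariant under rearrangement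
lemma pvDedup_countP {l₁ l₂ : List Int} (hp : l₁.Perm l₂) (k : Nat) :
    (PySem.List.dedup l₁).countP (fun v => l₁.count v == k)
      = (PySem.List.dedup l₂).countP (fun v => l₂.count v == k) := by
  have h1 : (PySem.List.dedup l₁).countP (fun v => l₁.count v == k)
      = (PySem.List.dedup l₁).countP (fun v => l₂.count v == k) :=
    List.countP_congr (fun v _ => by rw [hp.count_eq])
  have hdp : (PySem.List.dedup l₁).Perm (PySem.List.dedup l₂) := by
    rw [List.perm_ext_iff_of_nodup (PySem.List.nodup_dedup _) (PySem.List.nodup_dedup _)]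
    intro v
    rw [PySem.List.mem_dedup, PySem.List.mem_dedup, hp.mem_iff]
  rw [h1, hdp.countP_eq]

-- ===== VERDICT (by name: the statement is the Claim_ definition above) =====
theorem get_four_three_two_card_jing_nums_spec : Claim_equal_get_four_three_two_card_jing_nums := by
  intro tile_list jing_card _
  unfold Spec_get_four_three_two_card_jing_nums
  simp only [get_four_three_two_card_jing_nums, get_four_three_two_card_jing_nums_alt,
    PySem.List.count_eq]
  simp only [pvRemoveLoop_eq_filter, pvFoldA_countP]
  set t := tile_list.filter (fun x => x != jing_card) with ht
  set s := PySem.List.sorted t (fun x => x) false with hsdef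
  have hpair : s.Pairwise (· ≤ ·) := PySem.List.sorted_pairwise t (fun x => x)
  rw [pvRunScan_spec s hpair]
  have hperm1 : (PySem.List.sorted (PySem.Set.ofList t)
      (fun x => (PySem.List.index? t x).getD 0) false).Perm (PySem.List.dedup t) := by
    rw [PySem.List.dedup_eq_ofList]
    exact PySem.List.sorted_perm _ _ _
  have hts : t.Perm s := (PySem.List.sorted_perm t (fun x => x) false).symm
  have hk : ∀ k : Nat,
      ((PySem.List.sorted (PySem.Set.ofList t)
        (fun x => (PySem.List.index? t x).getD 0) false).countP (fun v => List.count v t == k))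
      = (PySem.List.dedup s).countP (fun v => s.count v == k) := by
    intro k
    rw [hperm1.countP_eq, pvDedup_countP hts k]
  simp only [hk 4, hk 3, hk 2, zero_add]
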